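-- pv_equiv track=rewrite | github.com/configflux/weld | weld/arch_lint_format.py | _ordered_rule_keys
-- ===== SOURCE A (Python) =====
-- _RULE_PRINT_ORDER: tuple[str, ...] = (
--     "no-circular-deps",
--     "boundary-enforcement",
--     "strategy-coverage",
--     "orphan-detection",
-- )
--
-- def _ordered_rule_keys(rules_run: list[str]) -> list[str]:
--     """Return rule ids ordered by print priority then declaration order."""
--     seen: set[str] = set()
--     ordered: list[str] = []
--     for rid in _RULE_PRINT_ORDER:
--         if rid in rules_run and rid not in seen:
--             ordered.append(rid)
--             seen.add(rid)
--     for rid in rules_run: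
--         if rid not in seen:
--             ordered.append(rid)
--             seen.add(rid)
--     return ordered
-- ===== SOURCE B (Python) =====
-- _RULE_PRINT_ORDER: tuple[str, ...] = (
--     "no-circular-deps",
--     "boundary-enforcement",
--     "strategy-coverage",
--     "orphan-detection",
-- )
--
-- def _ordered_rule_keys(rules_run: list[str]) -> list[str]:
--     """Return rule ids ordered by print priority then declaration order."""
--     unique = list(dict.fromkeys(rules_run))
--     priority = {rid: i for i, rid in enumerate(_RULE_PRINT_ORDER)}
--     return sorted(unique, key=lambda rid: priority.get(rid, len(_RULE_PRINT_ORDER)))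
-- ===== Notes on version B (the rewrite author's own statement) =====
-- stated objective: idiomatic
-- what changed: Replaces A's two scan-and-append loops with a seen-set by a one-line dedup (dict.fromkeys) followed by a stable sort under a priority-index key with a sentinel for non-priority ids.
import Mathlib
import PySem

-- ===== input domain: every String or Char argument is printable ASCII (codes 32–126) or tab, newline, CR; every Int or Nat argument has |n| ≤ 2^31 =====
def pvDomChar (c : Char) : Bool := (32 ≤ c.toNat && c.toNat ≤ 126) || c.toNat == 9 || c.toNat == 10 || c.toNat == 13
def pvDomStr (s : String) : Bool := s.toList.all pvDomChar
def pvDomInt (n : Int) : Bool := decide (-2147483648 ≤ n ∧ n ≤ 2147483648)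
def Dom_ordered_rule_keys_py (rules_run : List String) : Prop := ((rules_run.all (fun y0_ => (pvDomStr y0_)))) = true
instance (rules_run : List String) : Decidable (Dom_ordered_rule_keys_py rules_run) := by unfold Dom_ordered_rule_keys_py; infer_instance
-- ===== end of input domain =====

-- B replaces A's two scan-and-append loops with an ordered dedup plus a stable sort
-- under a priority-index key (objective: idiomatic; return value only).

-- ===== PORT A =====
-- module constant _RULE_PRINT_ORDER (shared by both ports)
def RULE_PRINT_ORDER : List String :=
  ["no-circular-deps", "boundary-enforcement", "strategy-coverage", "orphan-detection"]

def ordered_rule_keys_py (rules_run : List String) : List String :=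
  -- seen: set[str] = set(); ordered: list[str] = []
  -- for rid in _RULE_PRINT_ORDER: if rid in rules_run and rid not in seen: append / add
  let step1 := RULE_PRINT_ORDER.foldl
    (fun (st : PySem.Set String × List String) rid =>
      if rid ∈ rules_run ∧ ¬ rid ∈ st.1 then (PySem.Set.add st.1 rid, st.2 ++ [rid]) else st)
    (PySem.Set.empty, [])
  -- for rid in rules_run: if rid not in seen: append / add
  let step2 := rules_run.foldl
    (fun (st : PySem.Set String × List String) rid =>
      if ¬ rid ∈ st.1 then (PySem.Set.add st.1 rid, st.2 ++ [rid]) else st)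
    step1
  step2.2

-- ===== PORT B =====
def ordered_rule_keys_py_alt (rules_run : List String) : List String :=
  -- unique = list(dict.fromkeys(rules_run))
  let unique := PySem.List.dedup rules_run
  -- priority = {rid: i for i, rid in enumerate(_RULE_PRINT_ORDER)}
  let priority : PySem.Dict String Int :=
    (PySem.List.enumerate RULE_PRINT_ORDER).foldl (fun d p => d.insert p.2 p.1) PySem.Dict.empty
  -- sorted(unique, key=lambda rid: priority.get(rid, len(_RULE_PRINT_ORDER)))
  PySem.List.sorted unique (fun rid => priority.getD rid (PySem.List.len RULE_PRINT_ORDER)) false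

-- ===== PRECONDITION & SPEC =====
def Spec_ordered_rule_keys_py (rules_run : List String) (out : List String) : Prop := out = ordered_rule_keys_py_alt rules_run
instance (rules_run : List String) (out : List String) : Decidable (Spec_ordered_rule_keys_py rules_run out) := by unfold Spec_ordered_rule_keys_py; infer_instance

-- ===== CLAIM (what is proved, stated in full; the proofs are below) =====
def Claim_equal_ordered_rule_keys_py : Prop := ∀ (rules_run : List String), Dom_ordered_rule_keys_py rules_run → Spec_ordered_rule_keys_py rules_run (ordered_rule_keys_py rules_run)

-- ===== LEMMAS AND PROOFS =====

-- B's sort key, written out as a case split on the four priority ids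
def pvK (r : String) : Int :=
  if r = "no-circular-deps" then 0
  else if r = "boundary-enforcement" then 1
  else if r = "strategy-coverage" then 2
  else if r = "orphan-detection" then 3
  else 4

-- one key group of the stable sort
def pvGG (i : Int) (u : List String) : List String := u.filter (fun r => decide (pvK r = i))

-- the stably-sorted-by-pvK form: the five key groups in order
def pvG (u : List String) : List String :=
  pvGG 0 u ++ (pvGG 1 u ++ (pvGG 2 u ++ (pvGG 3 u ++ pvGG 4 u)))

-- the priority ids present in rules_run, in print order
def pvPresent (rules_run : List String) : List String :=
  (if "no-circular-deps" ∈ rules_run then ["no-circular-deps"] else []) ++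
  (if "boundary-enforcement" ∈ rules_run then ["boundary-enforcement"] else []) ++
  (if "strategy-coverage" ∈ rules_run then ["strategy-coverage"] else []) ++
  (if "orphan-detection" ∈ rules_run then ["orphan-detection"] else [])

theorem pv_mem_group {i : Int} {u : List String} {y : String}
    (hy : y ∈ pvGG i u) : pvK y = i := by
  simpa using (List.mem_filter.mp hy).2

theorem pv_insertBy_cons_pos {α : Type} (before : α → α → Bool) (x y : α) (t : List α)
    (h : before x y = true) : PySem.List.insertBy before x (y :: t) = x :: y :: t := by
  simp [PySem.List.insertBy, h]

theorem pv_insertBy_cons_neg {α : Type} (before : α → α → Bool) (x y : α) (t : List α)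
    (h : before x y = false) :
    PySem.List.insertBy before x (y :: t) = y :: PySem.List.insertBy before x t := by
  simp [PySem.List.insertBy, h]

theorem pv_insertBy_append {α : Type} (before : α → α → Bool) (x : α) (ys zs : List α)
    (h : ∀ y ∈ ys, before x y = false) :
    PySem.List.insertBy before x (ys ++ zs) = ys ++ PySem.List.insertBy before x zs := by
  induction ys with
  | nil => rfl
  | cons y t ih =>
    rw [List.cons_append, pv_insertBy_cons_neg _ _ _ _ (h y (by simp)),
      ih (fun z hz => h z (by simp [hz]))]
    rfl

theorem pv_insertBy_all {α : Type} (before : α → α → Bool) (x : α) (zs : List α)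
    (h : ∀ y ∈ zs, before x y = true) :
    PySem.List.insertBy before x zs = x :: zs := by
  cases zs with
  | nil => rfl
  | cons y t => exact pv_insertBy_cons_pos _ _ _ _ (h y (by simp))

theorem pv_insertBy_last {α : Type} (before : α → α → Bool) (x : α) (zs : List α)
    (h : ∀ y ∈ zs, before x y = false) :
    PySem.List.insertBy before x zs = zs ++ [x] := by
  induction zs with
  | nil => rfl
  | cons y t ih =>
    rw [pv_insertBy_cons_neg _ _ _ _ (h y (by simp)), ih (fun z hz => h z (by simp [hz]))]
    rfl

theorem pvG_insert (u : List String) (x : String) :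
    PySem.List.insertBy (fun a b => decide (pvK a < pvK b)) x (pvG u) = pvG (u ++ [x]) := by
  have hx5 : pvK x = 0 ∨ pvK x = 1 ∨ pvK x = 2 ∨ pvK x = 3 ∨ pvK x = 4 := by
    unfold pvK; split_ifs <;> simp
  have hGapp : ∀ i : Int, pvGG i (u ++ [x]) = pvGG i u ++ (if pvK x = i then [x] else []) := by
    intro i
    by_cases hi : pvK x = i <;> simp [pvGG, List.filter_append, hi]
  unfold pvG
  rcases hx5 with hk | hk | hk | hk | hk <;>
    simp only [hGapp, hk] <;> norm_num
  · -- pvK x = 0 : x goes after group 0, before groups 1-4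
    rw [pv_insertBy_append _ _ _ _ (fun y hy => by simp [pv_mem_group hy, hk]),
      pv_insertBy_all _ _ _ (fun y hy => by
        rcases List.mem_append.mp hy with h | h
        · simp [pv_mem_group h, hk]
        rcases List.mem_append.mp h with h | h
        · simp [pv_mem_group h, hk]
        rcases List.mem_append.mp h with h | h <;> simp [pv_mem_group h, hk])]
  · -- pvK x = 1
    rw [pv_insertBy_append _ _ _ _ (fun y hy => by simp [pv_mem_group hy, hk]),
      pv_insertBy_append _ _ _ _ (fun y hy => by simp [pv_mem_group hy, hk]),
      pv_insertBy_all _ _ _ (fun y hy => by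
        rcases List.mem_append.mp hy with h | h
        · simp [pv_mem_group h, hk]
        rcases List.mem_append.mp h with h | h <;> simp [pv_mem_group h, hk])]
  · -- pvK x = 2
    rw [pv_insertBy_append _ _ _ _ (fun y hy => by simp [pv_mem_group hy, hk]),
      pv_insertBy_append _ _ _ _ (fun y hy => by simp [pv_mem_group hy, hk]),
      pv_insertBy_append _ _ _ _ (fun y hy => by simp [pv_mem_group hy, hk]),
      pv_insertBy_all _ _ _ (fun y hy => by
        rcases List.mem_append.mp hy with h | h <;> simp [pv_mem_group h, hk])]
  · -- pvK x = 3
    rw [pv_insertBy_append _ _ _ _ (fun y hy => by simp [pv_mem_group hy, hk]),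
      pv_insertBy_append _ _ _ _ (fun y hy => by simp [pv_mem_group hy, hk]),
      pv_insertBy_append _ _ _ _ (fun y hy => by simp [pv_mem_group hy, hk]),
      pv_insertBy_append _ _ _ _ (fun y hy => by simp [pv_mem_group hy, hk]),
      pv_insertBy_all _ _ _ (fun y hy => by simp [pv_mem_group hy, hk])]
  · -- pvK x = 4 : x goes to the very end
    rw [pv_insertBy_append _ _ _ _ (fun y hy => by simp [pv_mem_group hy, hk]),
      pv_insertBy_append _ _ _ _ (fun y hy => by simp [pv_mem_group hy, hk]),
      pv_insertBy_append _ _ _ _ (fun y hy => by simp [pv_mem_group hy, hk]),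
      pv_insertBy_append _ _ _ _ (fun y hy => by simp [pv_mem_group hy, hk]),
      pv_insertBy_last _ _ _ (fun y hy => by simp [pv_mem_group hy, hk])]

theorem sorted_pvK_eq_pvG (u : List String) :
    PySem.List.sorted u pvK false = pvG u := by
  rw [PySem.List.sorted_eq_foldl_insertBy]
  induction u using List.reverseRecOn with
  | nil => simp [pvG, pvGG]
  | append_singleton t x ih => rw [List.foldl_append, List.foldl_cons, List.foldl_nil, ih, pvG_insert]

theorem alt_eq_sorted (rules_run : List String) :
    ordered_rule_keys_py_alt rules_run = PySem.List.sorted (PySem.List.dedup rules_run) pvK false := by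
  have hfun : (fun rid =>
      ((PySem.List.enumerate RULE_PRINT_ORDER).foldl
          (fun (d : PySem.Dict String Int) p => d.insert p.2 p.1) PySem.Dict.empty).getD rid
        (PySem.List.len RULE_PRINT_ORDER)) = pvK := by
    funext r
    simp only [RULE_PRINT_ORDER, PySem.List.enumerate_cons, PySem.List.enumerate_nil,
      List.foldl_cons, List.foldl_nil, PySem.Dict.getD_insert, PySem.Dict.getD_empty,
      PySem.List.len, pvK]
    norm_num
    by_cases e0 : r = "no-circular-deps" <;> by_cases e1 : r = "boundary-enforcement" <;>
      by_cases e2 : r = "strategy-coverage" <;> by_cases e3 : r = "orphan-detection" <;>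
      simp [e0, e1, e2, e3]
  simp only [ordered_rule_keys_py_alt, hfun]

-- second loop: appends the first occurrences of the ids not yet seen
theorem pv_discard_filter (L : List String) (r : String) (s : List String) (hr : r ∈ s) :
    (PySem.Set.discard L r).filter (fun y => decide (¬ y ∈ s)) =
      L.filter (fun y => decide (¬ y ∈ s)) := by
  simp only [PySem.Set.discard, List.filter_filter]
  apply List.filter_congr
  intro a _
  by_cases ha : a ∈ s
  · simp [ha]
  · have : a ≠ r := fun h => ha (h ▸ hr)
    simp [ha, this]

theorem pv_filter_add (L : List String) (r : String) (s : List String) (hr : ¬ r ∈ s) :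
    L.filter (fun y => decide (¬ y ∈ PySem.Set.add s r)) =
      (PySem.Set.discard L r).filter (fun y => decide (¬ y ∈ s)) := by
  simp only [PySem.Set.discard, List.filter_filter]
  apply List.filter_congr
  intro a _
  by_cases h1 : a = r <;> by_cases h2 : a ∈ s <;>
    simp [h1, h2, PySem.Set.add_of_not_mem hr]

theorem pv_loop2 (l : List String) : ∀ (s acc : List String),
    (l.foldl
      (fun (st : PySem.Set String × List String) rid =>
        if ¬ rid ∈ st.1 then (PySem.Set.add st.1 rid, st.2 ++ [rid]) else st) (s, acc)).2
      = acc ++ (PySem.List.dedup l).filter (fun r => decide (¬ r ∈ s)) := by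
  induction l with
  | nil => intro s acc; simp [PySem.List.dedup, PySem.Set.ofList]
  | cons r t ih =>
    intro s acc
    rw [List.foldl_cons]
    have hded : PySem.List.dedup (r :: t) = r :: PySem.Set.discard (PySem.List.dedup t) r := by
      simp [PySem.List.dedup, PySem.Set.ofList_cons]
    by_cases hr : r ∈ s
    · rw [if_neg (by simpa using hr), ih s acc, hded, List.filter_cons,
        pv_discard_filter _ _ _ hr]
      simp [hr]
    · rw [if_pos (by simpa using hr), ih (PySem.Set.add s r) (acc ++ [r]), hded,
        List.filter_cons, pv_filter_add _ _ _ hr]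
      simp [hr]

-- first loop: collects the priority ids present, in print order (seen = ordered as lists)
theorem pv_step1 (rules_run : List String) :
    RULE_PRINT_ORDER.foldl
      (fun (st : PySem.Set String × List String) rid =>
        if rid ∈ rules_run ∧ ¬ rid ∈ st.1 then (PySem.Set.add st.1 rid, st.2 ++ [rid]) else st)
      (PySem.Set.empty, []) = (pvPresent rules_run, pvPresent rules_run) := by
  by_cases h0 : "no-circular-deps" ∈ rules_run <;>
  by_cases h1 : "boundary-enforcement" ∈ rules_run <;>
  by_cases h2 : "strategy-coverage" ∈ rules_run <;>
  by_cases h3 : "orphan-detection" ∈ rules_run <;>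
    simp [RULE_PRINT_ORDER, pvPresent, h0, h1, h2, h3, PySem.Set.empty, PySem.Set.add,
      PySem.Set.contains]

theorem a_eq (rules_run : List String) :
    ordered_rule_keys_py rules_run =
      pvPresent rules_run ++
        (PySem.List.dedup rules_run).filter (fun r => decide (¬ r ∈ pvPresent rules_run)) := by
  simp only [ordered_rule_keys_py]
  rw [pv_step1, pv_loop2]

theorem pv_filter_eq_singleton (a : String) : ∀ (u : List String), u.Nodup →
    u.filter (fun r => decide (r = a)) = if a ∈ u then [a] else [] := by
  intro u
  induction u with
  | nil => simp
  | cons x t ih =>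
    intro hu
    have hx := (List.nodup_cons.mp hu).1
    have ih' := ih (List.nodup_cons.mp hu).2
    by_cases hxa : x = a
    · subst hxa
      have hnil : t.filter (fun r => decide (r = x)) = [] :=
        List.filter_eq_nil_iff.mpr (fun b hb => by simpa using fun h : b = x => hx (h ▸ hb))
      simp [hnil]
    · simp [hxa, ih', Ne.symm hxa]

theorem pv_group_congr (i : Int) (a : String) (ha : pvK a = i) (hi : ∀ r, pvK r = i → r = a)
    (u : List String) : pvGG i u = u.filter (fun r => decide (r = a)) := by
  apply List.filter_congr
  intro r _
  by_cases h : r = a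
  · simp [h, ha]
  · have hni : ¬ pvK r = i := fun hk => h (hi r hk)
    simp [h, hni]

theorem pv_tail_congr (rules_run u : List String) (hu : ∀ r ∈ u, r ∈ rules_run) :
    u.filter (fun r => decide (¬ r ∈ pvPresent rules_run)) = pvGG 4 u := by
  apply List.filter_congr
  intro r hr
  have hrr := hu r hr
  unfold pvPresent pvK
  by_cases e0 : r = "no-circular-deps"
  · subst e0; simp [hrr]
  by_cases e1 : r = "boundary-enforcement"
  · subst e1; simp [hrr]
  by_cases e2 : r = "strategy-coverage"
  · subst e2; simp [hrr]
  by_cases e3 : r = "orphan-detection"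
  · subst e3; simp [hrr]
  · split_ifs <;> simp_all

theorem present_filter_eq_pvG (rules_run : List String) :
    pvPresent rules_run ++
        (PySem.List.dedup rules_run).filter (fun r => decide (¬ r ∈ pvPresent rules_run)) =
      pvG (PySem.List.dedup rules_run) := by
  have hnd : (PySem.List.dedup rules_run).Nodup := PySem.List.nodup_dedup rules_run
  have hmem : ∀ r ∈ PySem.List.dedup rules_run, r ∈ rules_run := by
    intro r hr; exact (PySem.List.mem_dedup _ _).mp hr
  unfold pvG
  rw [pv_group_congr 0 "no-circular-deps" (by decide) (by intro r; unfold pvK; split_ifs <;> simp_all),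
    pv_group_congr 1 "boundary-enforcement" (by decide) (by intro r; unfold pvK; split_ifs <;> simp_all),
    pv_group_congr 2 "strategy-coverage" (by decide) (by intro r; unfold pvK; split_ifs <;> simp_all),
    pv_group_congr 3 "orphan-detection" (by decide) (by intro r; unfold pvK; split_ifs <;> simp_all),
    pv_filter_eq_singleton _ _ hnd, pv_filter_eq_singleton _ _ hnd,
    pv_filter_eq_singleton _ _ hnd, pv_filter_eq_singleton _ _ hnd,
    ← pv_tail_congr rules_run _ hmem]
  simp [pvPresent, List.append_assoc]

-- ===== VERDICT (by name: the statement is the Claim_ definition above) =====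
theorem ordered_rule_keys_py_spec : Claim_equal_ordered_rule_keys_py := by
  intro rules_run _
  unfold Spec_ordered_rule_keys_py
  rw [alt_eq_sorted, sorted_pvK_eq_pvG, a_eq, present_filter_eq_pvG]
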